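-- pv_equiv track=rewrite | github.com/sueszli/vector-database-benchmark | dataset/python-mutated/loop_scoping_test.py | while_with_local_var
-- ===== SOURCE A (Python) =====
-- def while_with_local_var(x):
--     if False:
--         return 10
--     s = 0
--     while x > 0:
--         y = x + 2
--         s = s * 10 + y
--         x -= 1
--     return s
-- ===== SOURCE B (Python) =====
-- def while_with_local_var(x):
--     # closed form: result = sum_{j=1}^{x} (j+2)*10^(j-1)
--     if x <= 0:
--         return 0
--     p = pow(10, x)
--     return (10 * x * p - (x + 1) * p + 1) // 81 + 2 * (p - 1) // 9
-- ===== Notes on version B (the rewrite author's own statement) =====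
-- stated objective: faster
-- what changed: replaces the digit-accumulating while loop by a closed-form expression of two exact geometric-series quotients around a single power computed by fast exponentiation; intended as faster, measured ~70x at the largest size both programs finished
import Mathlib
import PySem

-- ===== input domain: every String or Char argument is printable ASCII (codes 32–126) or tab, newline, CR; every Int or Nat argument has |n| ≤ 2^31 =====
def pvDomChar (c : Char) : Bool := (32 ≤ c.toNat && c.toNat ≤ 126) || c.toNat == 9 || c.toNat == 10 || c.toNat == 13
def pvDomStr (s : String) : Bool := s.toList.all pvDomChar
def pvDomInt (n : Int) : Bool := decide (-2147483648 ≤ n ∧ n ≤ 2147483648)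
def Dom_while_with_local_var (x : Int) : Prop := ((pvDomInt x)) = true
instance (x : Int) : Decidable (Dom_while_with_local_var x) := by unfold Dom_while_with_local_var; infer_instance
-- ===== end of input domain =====

-- B replaces the digit-accumulating while loop by a closed-form geometric-sum expression with fast exponentiation (intended as faster; a timing run measured ~70x at the largest size both finished).

-- ===== PORT A =====
-- the while loop of A: 'while x > 0: y = x + 2; s = s * 10 + y; x -= 1'
def pvLoopA (x s : Int) : Int :=
  if h : x > 0 then pvLoopA (x - 1) (s * 10 + (x + 2)) else s
termination_by x.toNat
decreasing_by omega

def while_with_local_var (x : Int) : Int :=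
  -- 'if False: return 10' is dead code; s = 0 then the loop
  pvLoopA x 0

-- ===== PORT B =====
def while_with_local_var_alt (x : Int) : Int :=
  if x ≤ 0 then 0
  else
    let p : Int := 10 ^ x.toNat
    PySem.Int.floordiv (10 * x * p - (x + 1) * p + 1) 81 + PySem.Int.floordiv (2 * (p - 1)) 9

-- ===== PRECONDITION & SPEC =====
def Spec_while_with_local_var (x : Int) (out : Int) : Prop := out = while_with_local_var_alt x
instance (x : Int) (out : Int) : Decidable (Spec_while_with_local_var x out) := by unfold Spec_while_with_local_var; infer_instance

-- ===== CLAIM (what is proved, stated in full; the proofs are below) =====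
def Claim_equal_while_with_local_var : Prop := ∀ (x : Int), Dom_while_with_local_var x → Spec_while_with_local_var x (while_with_local_var x)

-- ===== LEMMAS AND PROOFS =====

-- G n = sum_{j=1}^{n} (j+2)*10^(j-1), the loop's accumulated value
def pvG : Nat → Int
  | 0 => 0
  | n + 1 => pvG n + ((n : Int) + 3) * 10 ^ n

-- d n = sum_{j=1}^{n} j*10^(j-1)
def pvd : Nat → Int
  | 0 => 0
  | n + 1 => pvd n + ((n : Int) + 1) * 10 ^ n

-- c n = sum_{j=1}^{n} 2*10^(j-1)
def pvc : Nat → Int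
  | 0 => 0
  | n + 1 => pvc n + 2 * 10 ^ n

theorem pvLoopA_nonpos (x s : Int) (h : ¬ x > 0) : pvLoopA x s = s := by
  rw [pvLoopA]; simp [h]

theorem pvLoopA_eq (n : Nat) : ∀ s : Int, pvLoopA (n : Int) s = s * 10 ^ n + pvG n := by
  induction n with
  | zero => intro s; rw [pvLoopA]; simp [pvG]
  | succ n ih =>
      intro s
      rw [pvLoopA]
      have h : ((n + 1 : Nat) : Int) > 0 := by positivity
      rw [dif_pos h]
      have hx : ((n + 1 : Nat) : Int) - 1 = (n : Int) := by push_cast; ring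
      rw [hx, ih]
      simp [pvG]
      push_cast
      ring

theorem pvd_eq (n : Nat) : 10 * (n : Int) * 10 ^ n - ((n : Int) + 1) * 10 ^ n + 1 = 81 * pvd n := by
  induction n with
  | zero => simp [pvd]
  | succ n ih =>
      simp only [pvd]
      push_cast
      push_cast at ih
      ring_nf
      ring_nf at ih
      linarith [ih]

theorem pvc_eq (n : Nat) : 2 * ((10 : Int) ^ n - 1) = 9 * pvc n := by
  induction n with
  | zero => simp [pvc]
  | succ n ih =>
      simp only [pvc]
      ring_nf
      ring_nf at ih
      linarith [ih]

theorem pvG_eq (n : Nat) : pvG n = pvd n + pvc n := by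
  have key : 81 * pvG n = 81 * (pvd n + pvc n) := by
    induction n with
    | zero => simp [pvG, pvd, pvc]
    | succ n ih =>
        simp only [pvG, pvd, pvc]
        push_cast
        push_cast at ih
        ring_nf
        ring_nf at ih
        linarith [ih]
  omega

-- ===== VERDICT (by name: the statement is the Claim_ definition above) =====
theorem while_with_local_var_spec : Claim_equal_while_with_local_var := by
  intro x _
  unfold Spec_while_with_local_var while_with_local_var while_with_local_var_alt
  by_cases hx : x ≤ 0
  · rw [pvLoopA_nonpos x 0 (by omega), if_pos hx]
  · rw [if_neg hx]
    have hxe : x = ((x.toNat : Nat) : Int) := by omega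
    set n := x.toNat with hn
    rw [hxe, pvLoopA_eq n 0]
    have h1 : 10 * ((n : Int)) * 10 ^ n - ((n : Int) + 1) * 10 ^ n + 1 = 81 * pvd n := pvd_eq n
    have h2 : 2 * ((10 : Int) ^ n - 1) = 9 * pvc n := pvc_eq n
    simp only [h1, h2]
    rw [PySem.Int.floordiv_eq_ediv_of_pos (by norm_num),
        PySem.Int.floordiv_eq_ediv_of_pos (by norm_num)]
    rw [Int.mul_ediv_cancel_left _ (by norm_num : (81:Int) ≠ 0),
        Int.mul_ediv_cancel_left _ (by norm_num : (9:Int) ≠ 0)]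
    simp [pvG_eq n]
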